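-- pv_equiv track=rewrite | github.com/0417taehyun/Algorithm | LeetCode/Python/1_Easy/1342.py | bitcount_with_bitmask_solution
-- ===== SOURCE A (Python) =====
-- def bitcount_with_bitmask_solution(num: int) -> int:
--     answer: int = 0
--     if num == 0:
--         return answer
--
--     bitmask: int = 1
--     while bitmask <= num:
--         if (num & bitmask) == 0:
--             answer += 1
--         else:
--             answer += 2
--         bitmask *= 2
--     return answer - 1
-- ===== SOURCE B (Python) =====
-- def bitcount_with_bitmask_solution(num: int) -> int:
--     # Direct simulation of the reduction: halve when even, subtract 1 when odd.
--     steps = 0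
--     while num:
--         if num % 2:
--             num -= 1
--         else:
--             num //= 2
--         steps += 1
--     return steps
-- ===== Notes on version B (the rewrite author's own statement) =====
-- stated objective: idiomatic
-- what changed: B simulates the reduction itself (halving even values, decrementing odd ones, counting steps) instead of A's bitmask scan that tallies a per-bit contribution and subtracts a final correction; Pre_ restricts to the task's natural domain of nonnegative inputs, since on negative inputs the plain simulation never terminates while A still returns a value there.
-- outside the precondition, e.g. on bitcount_with_bitmask_solution(-5): A returns -1, B does not finish within the time limit; on bitcount_with_bitmask_solution(-1): A returns -1, B does not finish within the time limit
import Mathlib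
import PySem

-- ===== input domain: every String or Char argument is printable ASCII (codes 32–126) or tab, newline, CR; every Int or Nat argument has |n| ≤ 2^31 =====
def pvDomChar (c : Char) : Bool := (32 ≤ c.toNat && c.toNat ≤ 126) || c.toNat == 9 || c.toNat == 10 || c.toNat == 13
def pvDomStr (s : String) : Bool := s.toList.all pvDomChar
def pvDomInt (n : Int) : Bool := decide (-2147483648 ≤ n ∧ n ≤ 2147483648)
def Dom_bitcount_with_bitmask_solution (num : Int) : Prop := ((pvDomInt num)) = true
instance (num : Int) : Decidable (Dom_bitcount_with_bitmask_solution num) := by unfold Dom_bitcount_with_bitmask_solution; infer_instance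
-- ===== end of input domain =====

-- B replaces A's bitmask scan (+1/+2 per bit position, minus one at the end) by the direct
-- simulation of the reduction process on num ≥ 0; same cost, plainer code.

-- ===== PORT A =====
-- A's while-loop; fuel only makes the recursion total (bitmask doubles from 1, so 64
-- iterations are never exhausted for |num| ≤ 2^31; the loop body is A's, step for step).
def pvLoopA (fuel : Nat) (num bitmask answer : Int) : Int :=
  match fuel with
  | 0 => answer
  | fuel + 1 =>
    if bitmask ≤ num then
      pvLoopA fuel num (bitmask * 2) (answer + (if Int.land num bitmask = 0 then 1 else 2))
    else answer

def bitcount_with_bitmask_solution (num : Int) : Int :=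
  if num = 0 then 0
  else pvLoopA 64 num 1 0 - 1

-- ===== PORT B =====
-- Source B's while-loop; inside Pre_ the loop variable stays nonnegative, so it is carried
-- as a Nat, which also gives termination.
def pvLoopB (n : Nat) (steps : Int) : Int :=
  if h : n ≠ 0 then
    if n % 2 = 1 then pvLoopB (n - 1) (steps + 1)
    else pvLoopB (n / 2) (steps + 1)
  else steps
termination_by n
decreasing_by
  · omega
  · omega

def bitcount_with_bitmask_solution_alt (num : Int) : Int :=
  pvLoopB num.toNat 0

-- ===== PRECONDITION & SPEC =====
-- Pre_ excludes negative inputs (the task's natural domain is num ≥ 0): on them the plain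
-- simulation B never terminates, while A's bitmask loop body never runs and A still returns a value.
def Pre_bitcount_with_bitmask_solution (num : Int) : Prop := 0 ≤ num
instance (num : Int) : Decidable (Pre_bitcount_with_bitmask_solution num) := by unfold Pre_bitcount_with_bitmask_solution; infer_instance

def pvWitness_bitcount_with_bitmask_solution : Int := 5

def Spec_bitcount_with_bitmask_solution (num : Int) (out : Int) : Prop := out = bitcount_with_bitmask_solution_alt num
instance (num : Int) (out : Int) : Decidable (Spec_bitcount_with_bitmask_solution num out) := by unfold Spec_bitcount_with_bitmask_solution; infer_instance

-- ===== CLAIM (what is proved, stated in full; the proofs are below) =====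
def Claim_equal_bitcount_with_bitmask_solution : Prop := ∀ (num : Int), Dom_bitcount_with_bitmask_solution num → Pre_bitcount_with_bitmask_solution num → Spec_bitcount_with_bitmask_solution num (bitcount_with_bitmask_solution num)

-- ===== LEMMAS AND PROOFS =====

-- the count A's loop accumulates, as a function of the (nonnegative) input
def gA (n : Nat) : Int :=
  if n = 0 then 0
  else (if n % 2 = 0 then 1 else 2) + gA (n / 2)
termination_by n
decreasing_by omega

-- the step count B's loop accumulates
def gB (n : Nat) : Int :=
  if n = 0 then 0
  else if n % 2 = 1 then 1 + gB (n - 1) else 1 + gB (n / 2)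
termination_by n
decreasing_by
  · omega
  · omega

lemma land_two_mul (n b : Nat) : n &&& (2 * b) = 2 * ((n / 2) &&& b) := by
  have h1 : 2 * b = b <<< 1 := by rw [Nat.shiftLeft_eq]; ring
  have h2 : 2 * ((n / 2) &&& b) = ((n / 2) &&& b) <<< 1 := by rw [Nat.shiftLeft_eq]; ring
  rw [h1, h2]
  apply Nat.eq_of_testBit_eq
  intro i
  simp only [Nat.testBit_land, Nat.testBit_shiftLeft]
  cases i with
  | zero => simp
  | succ i =>
    simp [Nat.testBit_succ, Bool.and_comm]

lemma int_land_natCast (n b : Nat) : Int.land (n : Int) (b : Int) = ((n &&& b : Nat) : Int) := rfl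

lemma gA_zero : gA 0 = 0 := by rw [gA]; simp

lemma gB_zero : gB 0 = 0 := by rw [gB]; simp

-- shifting the bitmask by one bit is the same as shifting the number down by one bit
lemma loopA_shift (fuel : Nat) : ∀ (n b : Nat) (a : Int),
    pvLoopA fuel (n : Int) ((2 * b : Nat) : Int) a = pvLoopA fuel ((n / 2 : Nat) : Int) (b : Int) a := by
  induction fuel with
  | zero => intro n b a; rfl
  | succ fuel ih =>
    intro n b a
    simp only [pvLoopA]
    have hcond : (((2 * b : Nat) : Int) ≤ (n : Int)) ↔ ((b : Int) ≤ ((n / 2 : Nat) : Int)) := by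
      push_cast; omega
    by_cases h : ((2 * b : Nat) : Int) ≤ (n : Int)
    · rw [if_pos h, if_pos (hcond.mp h)]
      have hland : (Int.land (n : Int) ((2 * b : Nat) : Int) = 0) ↔
          (Int.land ((n / 2 : Nat) : Int) (b : Int) = 0) := by
        rw [int_land_natCast, int_land_natCast, land_two_mul]
        constructor <;> intro hx <;> omega
      have hmul : ((2 * b : Nat) : Int) * 2 = ((2 * (2 * b) : Nat) : Int) := by push_cast; ring
      have hmul2 : ((b : Nat) : Int) * 2 = ((2 * b : Nat) : Int) := by push_cast; ring
      rw [hmul]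
      by_cases hz : Int.land ((n / 2 : Nat) : Int) (b : Int) = 0
      · rw [if_pos (hland.mpr hz), if_pos hz, ih n (2 * b), hmul2]
      · rw [if_neg (fun hc => hz (hland.mp hc)), if_neg hz, ih n (2 * b), hmul2]
    · rw [if_neg h, if_neg (fun hc => h (hcond.mpr hc))]

lemma land_one (n : Nat) : n &&& 1 = n % 2 := Nat.and_one_is_mod n

-- with enough fuel, A's loop from bitmask 1 adds exactly gA n to the accumulator
lemma loopA_eq_gA (fuel : Nat) : ∀ (n : Nat) (a : Int), n < 2 ^ fuel →
    pvLoopA fuel (n : Int) 1 a = a + gA n := by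
  induction fuel with
  | zero =>
    intro n a h
    have h0 : n = 0 := by omega
    subst h0
    simp [pvLoopA, gA_zero]
  | succ fuel ih =>
    intro n a h
    simp only [pvLoopA]
    by_cases h0 : n = 0
    · subst h0
      rw [if_neg (by norm_num), gA_zero]
      ring
    · rw [if_pos (by exact_mod_cast Nat.one_le_iff_ne_zero.mpr h0)]
      have h1 : (Int.land (n : Int) 1 = 0) ↔ (n % 2 = 0) := by
        have hc : Int.land (n : Int) (((1 : Nat)) : Int) = ((n &&& 1 : Nat) : Int) :=
          int_land_natCast n 1
        rw [Nat.cast_one] at hc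
        rw [hc, land_one]
        omega
      have hb : (1 : Int) * 2 = ((2 * 1 : Nat) : Int) := by norm_num
      rw [hb, loopA_shift fuel n 1]
      have hdiv : n / 2 < 2 ^ fuel := by
        have := Nat.pow_lt_pow_succ (a := 2) (n := fuel) (by omega)
        omega
      rw [Nat.cast_one, ih (n / 2) _ hdiv]
      conv_rhs => rw [gA, if_neg h0]
      by_cases hp : n % 2 = 0
      · rw [if_pos (h1.mpr hp), if_pos hp]; ring
      · rw [if_neg (fun hc => hp (h1.mp hc)), if_neg hp]; ring

lemma loopB_eq_gB (n : Nat) : ∀ (s : Int), pvLoopB n s = s + gB n := by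
  induction n using Nat.strong_induction_on with
  | _ n ih =>
    intro s
    rw [pvLoopB, gB]
    by_cases h0 : n = 0
    · simp [h0]
    · rw [dif_pos h0, if_neg h0]
      by_cases hp : n % 2 = 1
      · rw [if_pos hp, if_pos hp, ih (n - 1) (by omega)]; ring
      · rw [if_neg hp, if_neg hp, ih (n / 2) (by omega)]; ring

-- the two counts: A's tally is one more than B's step count, for every positive input
lemma gA_eq_gB_succ (n : Nat) (hn : n ≠ 0) : gA n = gB n + 1 := by
  induction n using Nat.strong_induction_on with
  | _ n ih =>
    rw [gA, gB, if_neg hn, if_neg hn]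
    by_cases h1 : n = 1
    · subst h1; norm_num [gA_zero, gB_zero]
    · by_cases hp : n % 2 = 0
      · -- even, n ≥ 2
        rw [if_pos hp, if_neg (by omega)]
        rw [ih (n / 2) (by omega) (by omega)]
        ring
      · -- odd, n ≥ 3: B does a subtract step then a halving step
        rw [if_neg hp, if_pos (by omega)]
        have he : gB (n - 1) = 1 + gB ((n - 1) / 2) := by
          rw [gB, if_neg (by omega), if_neg (by omega)]
        rw [he]
        have hhalf : (n - 1) / 2 = n / 2 := by omega
        rw [hhalf, ih (n / 2) (by omega) (by omega)]
        ring

-- ===== VERDICT (by name: the statement is the Claim_ definition above) =====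
theorem bitcount_with_bitmask_solution_spec : Claim_equal_bitcount_with_bitmask_solution := by
  intro num hdom hpre
  unfold Spec_bitcount_with_bitmask_solution bitcount_with_bitmask_solution
    bitcount_with_bitmask_solution_alt
  unfold Pre_bitcount_with_bitmask_solution at hpre
  rcases eq_or_lt_of_le hpre with hzero | hpos
  · rw [if_pos hzero.symm, ← hzero]
    rw [show (0 : Int).toNat = 0 from rfl, pvLoopB]
    simp
  · rw [if_neg (by omega)]
    have hn : num = ((num.toNat : Nat) : Int) := by omega
    have hbound : num.toNat < 2 ^ 64 := by
      have hd : num ≤ 2147483648 := by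
        unfold Dom_bitcount_with_bitmask_solution pvDomInt at hdom
        simpa using (of_decide_eq_true hdom).2
      omega
    rw [hn]
    simp only [Int.toNat_natCast]
    rw [loopA_eq_gA 64 num.toNat 0 hbound, loopB_eq_gB num.toNat 0,
      gA_eq_gB_succ num.toNat (by omega)]
    ring
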